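-- pv_equiv track=rewrite | github.com/SoftHeinrich/agent-linker | writing/analyze_gold_friction.py | enroll_set
-- ===== SOURCE A (Python) =====
-- def enroll_directory(dir_path, acm_files):
--     """Expand a directory path to individual files using ACM model."""
--     if not dir_path.endswith("/"):
--         return {dir_path}
--     return {f for f in acm_files if f.startswith(dir_path)}
--
-- def enroll_set(link_set, acm_files):
--     """Enroll all directory entries in a set of (sentence, code_path) pairs."""
--     enrolled = set()
--     for sid, code in link_set:
--         if code.endswith("/"):
--             for f in enroll_directory(code, acm_files):
--                 enrolled.add((sid, f))
--         else:
--             enrolled.add((sid, code))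
--     return enrolled
-- ===== SOURCE B (Python) =====
-- def enroll_set(link_set, acm_files):
--     """Enroll all directory entries in a set of (sentence, code_path) pairs."""
--     # Index pass: expand each distinct directory once.
--     expansion = {}
--     for _, code in link_set:
--         if code.endswith("/") and code not in expansion:
--             expansion[code] = [f for f in acm_files if f.startswith(code)]
--     # Emit pass: concatenate the expansions, dedup once at the end.
--     pairs = []
--     for sid, code in link_set:
--         pairs.extend((sid, f) for f in expansion.get(code, [code]))
--     return set(pairs)
-- ===== Notes on version B (the rewrite author's own statement) =====
-- stated objective: alternative
-- what changed: A rescans acm_files for every directory pair while adding into the set incrementally; B builds a dict index that expands each DISTINCT directory exactly once, then emits all pairs by lookup in a second pass and dedups once at the end, so repeated directories no longer trigger repeated scans.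
import Mathlib
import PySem

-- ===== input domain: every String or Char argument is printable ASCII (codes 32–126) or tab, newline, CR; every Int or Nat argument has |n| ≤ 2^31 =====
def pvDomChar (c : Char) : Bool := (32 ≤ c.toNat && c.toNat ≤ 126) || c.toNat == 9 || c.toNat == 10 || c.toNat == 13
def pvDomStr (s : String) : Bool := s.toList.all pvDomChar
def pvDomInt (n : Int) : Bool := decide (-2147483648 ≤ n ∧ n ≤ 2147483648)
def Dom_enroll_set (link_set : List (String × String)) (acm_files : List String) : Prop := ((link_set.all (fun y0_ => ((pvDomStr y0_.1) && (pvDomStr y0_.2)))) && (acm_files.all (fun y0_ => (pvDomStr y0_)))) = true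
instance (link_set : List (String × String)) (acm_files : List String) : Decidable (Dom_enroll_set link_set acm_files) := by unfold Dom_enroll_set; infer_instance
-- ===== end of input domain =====

-- B replaces A's per-pair rescans by an index pass that expands each distinct directory
-- once into a dict, an emit pass concatenating expansions, and a single final dedup
-- (objective: alternative; equivalence is about the returned set, listed in first-insertion order).

-- ===== PORT A =====
def enroll_directory (dir_path : String) (acm_files : List String) : PySem.Set String :=
  if !(PySem.Str.endswith dir_path "/") then PySem.Set.ofList [dir_path]
  else PySem.Set.ofList (acm_files.filter (fun f => PySem.Str.startswith f dir_path))

def enroll_set (link_set : List (String × String)) (acm_files : List String) : List (String × String) :=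
  link_set.foldl (fun enrolled sc =>
    if PySem.Str.endswith sc.2 "/" then
      (enroll_directory sc.2 acm_files).foldl (fun e f => PySem.Set.add e (sc.1, f)) enrolled
    else
      PySem.Set.add enrolled (sc.1, sc.2)) PySem.Set.empty

-- ===== PORT B =====
def enroll_set_alt (link_set : List (String × String)) (acm_files : List String) : List (String × String) :=
  let expansion : PySem.Dict String (List String) :=
    link_set.foldl (fun d sc =>
      if PySem.Str.endswith sc.2 "/" && !(d.contains sc.2) then
        d.insert sc.2 (acm_files.filter (fun f => PySem.Str.startswith f sc.2))
      else d) PySem.Dict.empty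
  let pairs : List (String × String) :=
    link_set.foldl (fun ps sc =>
      ps ++ (expansion.getD sc.2 [sc.2]).map (fun f => (sc.1, f))) []
  PySem.Set.ofList pairs

-- ===== PRECONDITION & SPEC =====
def Spec_enroll_set (link_set : List (String × String)) (acm_files : List String) (out : List (String × String)) : Prop := out = enroll_set_alt link_set acm_files
instance (link_set : List (String × String)) (acm_files : List String) (out : List (String × String)) : Decidable (Spec_enroll_set link_set acm_files out) := by unfold Spec_enroll_set; infer_instance

-- ===== CLAIM (what is proved, stated in full; the proofs are below) =====
def Claim_equal_enroll_set : Prop := ∀ (link_set : List (String × String)) (acm_files : List String), Dom_enroll_set link_set acm_files → Spec_enroll_set link_set acm_files (enroll_set link_set acm_files)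

-- ===== LEMMAS AND PROOFS =====

-- the pairs contributed by one (sid, code) link, in A's generation order (raw, before dedup)
def pvChunk (acm_files : List String) (sc : String × String) : List (String × String) :=
  if PySem.Str.endswith sc.2 "/" then
    (acm_files.filter (fun f => PySem.Str.startswith f sc.2)).map (fun f => (sc.1, f))
  else [(sc.1, sc.2)]

-- B's dict-building step
def pvUpd (acm_files : List String) (d : PySem.Dict String (List String)) (sc : String × String) : PySem.Dict String (List String) :=
  if PySem.Str.endswith sc.2 "/" && !(d.contains sc.2) then
    d.insert sc.2 (acm_files.filter (fun f => PySem.Str.startswith f sc.2))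
  else d

theorem pv_ofList_map_inj {α β : Type} [BEq α] [LawfulBEq α] [BEq β] [LawfulBEq β]
    (g : α → β) (hg : Function.Injective g) (l : List α) :
    PySem.Set.ofList (l.map g) = (PySem.Set.ofList l).map g := by
  induction l using List.reverseRecOn with
  | nil => rfl
  | append_singleton xs x ih =>
    rw [List.map_append, List.map_singleton, PySem.Set.ofList_append_singleton,
      PySem.Set.ofList_append_singleton, ih, PySem.Set.add_eq_ite, PySem.Set.add_eq_ite]
    by_cases hx : x ∈ PySem.Set.ofList xs
    · rw [if_pos hx, if_pos (List.mem_map_of_mem hx)]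
    · rw [if_neg hx, if_neg (by simpa [List.mem_map, hg.eq_iff] using hx), List.map_append,
        List.map_singleton]

theorem pv_update_congr {α : Type} [BEq α] [LawfulBEq α] (s : PySem.Set α) (xs ys : List α)
    (h : PySem.Set.ofList xs = PySem.Set.ofList ys) :
    PySem.Set.update s xs = PySem.Set.update s ys := by
  rw [PySem.Set.update_eq_append_filter, PySem.Set.update_eq_append_filter, h]

-- A's body, one step: processing one link updates the set with its chunk
theorem pvA_step (acm_files : List String) (sc : String × String)
    (s : PySem.Set (String × String)) :
    (if PySem.Str.endswith sc.2 "/" then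
      (enroll_directory sc.2 acm_files).foldl (fun e f => PySem.Set.add e (sc.1, f)) s
     else PySem.Set.add s (sc.1, sc.2)) = PySem.Set.update s (pvChunk acm_files sc) := by
  by_cases hend : PySem.Str.endswith sc.2 "/"
  · rw [if_pos hend, ← PySem.Set.update_map_eq_foldl_add]
    unfold enroll_directory pvChunk
    rw [hend]
    simp only [Bool.not_true, Bool.false_eq_true]
    rw [if_neg not_false]
    apply pv_update_congr
    rw [← pv_ofList_map_inj (Prod.mk sc.1) (fun a b h => by simpa using h),
      PySem.Set.ofList_ofList]
    simp
  · rw [if_neg hend]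
    unfold pvChunk
    rw [if_neg hend, PySem.Set.update_cons, PySem.Set.update_nil]

theorem pvA_fold (acm_files : List String) (ls : List (String × String))
    (s : PySem.Set (String × String)) :
    ls.foldl (fun enrolled sc =>
      if PySem.Str.endswith sc.2 "/" then
        (enroll_directory sc.2 acm_files).foldl (fun e f => PySem.Set.add e (sc.1, f)) enrolled
      else PySem.Set.add enrolled (sc.1, sc.2)) s
    = PySem.Set.update s (ls.flatMap (pvChunk acm_files)) := by
  induction ls generalizing s with
  | nil => rw [List.foldl_nil, List.flatMap_nil, PySem.Set.update_nil]
  | cons sc ls ih =>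
    rw [List.foldl_cons, ih, pvA_step, List.flatMap_cons, PySem.Set.update_append]

-- every value stored in B's dict is the filter of its key, and every key is a directory
theorem pvDict_canon (acm_files : List String) (ls : List (String × String))
    (d : PySem.Dict String (List String))
    (hd : ∀ k v, d.get? k = some v → PySem.Str.endswith k "/" = true ∧ v = acm_files.filter (fun f => PySem.Str.startswith f k)) :
    ∀ k v, (ls.foldl (pvUpd acm_files) d).get? k = some v →
      PySem.Str.endswith k "/" = true ∧ v = acm_files.filter (fun f => PySem.Str.startswith f k) := by
  induction ls generalizing d with
  | nil => exact hd
  | cons sc ls ih =>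
    rw [List.foldl_cons]
    apply ih
    intro k v hv
    unfold pvUpd at hv
    split at hv
    · rename_i hg
      by_cases hk : k = sc.2
      · subst hk
        rw [PySem.Dict.get?_insert_self] at hv
        cases hv
        exact ⟨by simpa using (Bool.and_eq_true _ _ |>.mp hg).1, rfl⟩
      · rw [PySem.Dict.get?_insert_of_ne d _ hk] at hv
        exact hd k v hv
    · exact hd k v hv

theorem pvDict_contains_mono (acm_files : List String) (ls : List (String × String))
    (d : PySem.Dict String (List String)) (k : String) (h : d.contains k = true) :
    (ls.foldl (pvUpd acm_files) d).contains k = true := by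
  induction ls generalizing d with
  | nil => exact h
  | cons sc ls ih =>
    rw [List.foldl_cons]
    apply ih
    unfold pvUpd
    split
    · rw [PySem.Dict.contains_insert, h, Bool.or_true]
    · exact h

theorem pvDict_covered (acm_files : List String) (ls : List (String × String))
    (d : PySem.Dict String (List String)) :
    ∀ sc ∈ ls, PySem.Str.endswith sc.2 "/" = true →
      (ls.foldl (pvUpd acm_files) d).contains sc.2 = true := by
  induction ls generalizing d with
  | nil => intro sc h; simp at h
  | cons sc' ls ih =>
    intro sc hsc hend
    rw [List.foldl_cons]
    rcases List.mem_cons.mp hsc with h | h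
    · subst h
      apply pvDict_contains_mono
      unfold pvUpd
      by_cases hc : d.contains sc.2 = true
      · rw [if_neg (by simp [hc])]
        exact hc
      · have hc' : d.contains sc.2 = false := by simpa using hc
        rw [if_pos (by simp [hc']; simpa using hend), PySem.Dict.contains_insert]
        simp
    · exact ih _ _ h hend

-- for each link in the list, B's lookup yields exactly A's chunk (before the sid pairing)
theorem pvB_lookup (acm_files : List String) (ls : List (String × String))
    (sc : String × String) (hsc : sc ∈ ls) :
    (PySem.Dict.getD (ls.foldl (pvUpd acm_files) PySem.Dict.empty) sc.2 [sc.2]).map (fun f => (sc.1, f))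
      = pvChunk acm_files sc := by
  have hcanon := pvDict_canon acm_files ls PySem.Dict.empty
    (by intro k v hv; simp [PySem.Dict.get?, PySem.Dict.empty] at hv)
  by_cases hend : PySem.Str.endswith sc.2 "/"
  · have hc := pvDict_covered acm_files ls PySem.Dict.empty sc hsc hend
    have hg : (ls.foldl (pvUpd acm_files) PySem.Dict.empty).get? sc.2 ≠ none := by
      rw [Ne, PySem.Dict.get?_eq_none_iff_contains, hc]; simp
    rcases Option.ne_none_iff_exists'.mp hg with ⟨v, hv⟩
    have := (hcanon sc.2 v hv).2
    unfold pvChunk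
    rw [if_pos hend]
    simp [PySem.Dict.getD, hv, this]
  · have hn : (ls.foldl (pvUpd acm_files) PySem.Dict.empty).get? sc.2 = none := by
      cases hv : (ls.foldl (pvUpd acm_files) PySem.Dict.empty).get? sc.2 with
      | none => rfl
      | some v => exact absurd ((hcanon sc.2 v hv).1) (by simpa using hend)
    unfold pvChunk
    rw [if_neg hend]
    simp [PySem.Dict.getD, hn]

theorem pvB_eq (acm_files : List String) (ls : List (String × String)) :
    enroll_set_alt ls acm_files = PySem.Set.ofList (ls.flatMap (pvChunk acm_files)) := by
  unfold enroll_set_alt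
  have h1 : ls.foldl (fun ps sc =>
      ps ++ ((ls.foldl (pvUpd acm_files) PySem.Dict.empty).getD sc.2 [sc.2]).map (fun f => (sc.1, f))) []
      = ls.foldl (fun ps sc => ps ++ pvChunk acm_files sc) [] := by
    apply PySem.List.foldl_congr_mem
    intro acc sc hsc
    rw [pvB_lookup acm_files ls sc hsc]
  show PySem.Set.ofList (ls.foldl (fun ps sc => ps ++ (PySem.Dict.getD (ls.foldl _ _) sc.2 [sc.2]).map (fun f => (sc.1, f))) []) = _
  rw [show (fun d sc => if PySem.Str.endswith sc.2 "/" && !(PySem.Dict.contains d sc.2) then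
        d.insert sc.2 (acm_files.filter (fun f => PySem.Str.startswith f sc.2)) else d) = pvUpd acm_files from rfl,
    h1, PySem.List.foldl_append_eq_flatMap, List.nil_append]

-- ===== VERDICT (by name: the statement is the Claim_ definition above) =====
theorem enroll_set_spec : Claim_equal_enroll_set := by
  intro ls acm _
  show enroll_set ls acm = enroll_set_alt ls acm
  rw [pvB_eq]
  unfold enroll_set
  rw [pvA_fold]
  rfl
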